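-- pv_equiv track=rewrite | github.com/phrugsa-limbunlom/algop | string_handle.py | count_letter_space_digit
-- ===== SOURCE A (Python) =====
-- def count_letter_space_digit(word: str) -> dict:
--     """
--     Counts the number of letters, spaces, and digits in a string.
--
--     Parameters:
--     word (str): The input string to analyze
--
--     Returns:
--     dict: Dictionary containing counts of letters, spaces, and digits
--     """
--     word_count_dict = {"letter": 0, "space": 0, "digit": 0}
--     for w in word:
--         if w.isalpha():
--             word_count_dict["letter"] = word_count_dict["letter"] + 1
--         elif w.isspace():
--             word_count_dict["space"] = word_count_dict["space"] + 1
--         elif w.isdigit():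
--             word_count_dict["digit"] = word_count_dict["digit"] + 1
--         else:
--             continue
--     return word_count_dict
-- ===== SOURCE B (Python) =====
-- def count_letter_space_digit(word: str) -> dict:
--     """Three independent category counts instead of one cascading classify loop."""
--     return {
--         "letter": sum(c.isalpha() for c in word),
--         "space": sum(c.isspace() for c in word),
--         "digit": sum(c.isdigit() for c in word),
--     }
-- ===== Notes on version B (the rewrite author's own statement) =====
-- stated objective: idiomatic
-- what changed: Replaces the single cascading elif loop mutating a dict with three independent sum-over-generator counts (one pass per category) assembled into a dict literal; safe because the categories are mutually exclusive.
import Mathlib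
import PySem

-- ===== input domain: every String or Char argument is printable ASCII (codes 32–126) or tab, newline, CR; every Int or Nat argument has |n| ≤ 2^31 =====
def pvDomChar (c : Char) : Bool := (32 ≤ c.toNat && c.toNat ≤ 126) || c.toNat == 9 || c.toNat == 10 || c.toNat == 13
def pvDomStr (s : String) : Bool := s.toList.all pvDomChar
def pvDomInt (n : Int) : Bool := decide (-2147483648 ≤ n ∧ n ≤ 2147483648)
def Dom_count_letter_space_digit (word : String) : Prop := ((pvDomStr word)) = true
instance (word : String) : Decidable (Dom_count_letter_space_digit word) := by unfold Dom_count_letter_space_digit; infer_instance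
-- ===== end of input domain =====

-- B replaces A's single cascading elif loop over a mutable dict with three independent
-- per-category counts assembled into a dict literal (idiomatic; same O(n) cost).


-- ===== PORT A =====
-- the initial dict {"letter": 0, "space": 0, "digit": 0} with the three running counts
def pvInitDict (a b c : Int) : PySem.Dict String Int :=
  ((PySem.Dict.empty.insert "letter" a).insert "space" b).insert "digit" c

def count_letter_space_digit (word : String) : List (String × Int) :=
  (word.toList.foldl (fun d w =>
      if PySem.Chars.isalpha w then d.insert "letter" (d.getD "letter" 0 + 1)
      else if PySem.Chars.isspace w then d.insert "space" (d.getD "space" 0 + 1)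
      else if PySem.Chars.isdigit w then d.insert "digit" (d.getD "digit" 0 + 1)
      else d)
    (pvInitDict 0 0 0)).items

-- ===== PORT B =====
def count_letter_space_digit_alt (word : String) : List (String × Int) :=
  [("letter", (word.toList.countP PySem.Chars.isalpha : Int)),
   ("space",  (word.toList.countP PySem.Chars.isspace : Int)),
   ("digit",  (word.toList.countP PySem.Chars.isdigit : Int))]

-- ===== PRECONDITION & SPEC =====
def Spec_count_letter_space_digit (word : String) (out : List (String × Int)) : Prop := out = count_letter_space_digit_alt word
instance (word : String) (out : List (String × Int)) : Decidable (Spec_count_letter_space_digit word out) := by unfold Spec_count_letter_space_digit; infer_instance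

-- ===== CLAIM (what is proved, stated in full; the proofs are below) =====
def Claim_equal_count_letter_space_digit : Prop := ∀ (word : String), Dom_count_letter_space_digit word → Spec_count_letter_space_digit word (count_letter_space_digit word)

-- ===== LEMMAS AND PROOFS =====
theorem pv_char_le_iff (a c : Char) : (a ≤ c) ↔ (a.toNat ≤ c.toNat) := ge_iff_le

theorem pv_space_not_alpha (c : Char) (h : PySem.Chars.isspace c = true) :
    PySem.Chars.isalpha c = false := by
  simp [PySem.Chars.isalpha, PySem.Chars.isspace, PySem.Chars.isupper, PySem.Chars.islower,
    pv_char_le_iff] at *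
  omega

theorem pv_digit_not_alpha_space (c : Char) (h : PySem.Chars.isdigit c = true) :
    PySem.Chars.isalpha c = false ∧ PySem.Chars.isspace c = false := by
  simp [PySem.Chars.isalpha, PySem.Chars.isspace, PySem.Chars.isdigit, PySem.Chars.isupper,
    PySem.Chars.islower, pv_char_le_iff] at *
  omega

theorem pv_init_insert_letter (a b c x : Int) :
    (pvInitDict a b c).insert "letter" x = pvInitDict x b c := rfl

theorem pv_init_insert_space (a b c x : Int) :
    (pvInitDict a b c).insert "space" x = pvInitDict a x c := rfl

theorem pv_init_insert_digit (a b c x : Int) :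
    (pvInitDict a b c).insert "digit" x = pvInitDict a b x := rfl

theorem pv_init_getD_letter (a b c : Int) : (pvInitDict a b c).getD "letter" 0 = a := rfl
theorem pv_init_getD_space (a b c : Int) : (pvInitDict a b c).getD "space" 0 = b := rfl
theorem pv_init_getD_digit (a b c : Int) : (pvInitDict a b c).getD "digit" 0 = c := rfl

-- the loop invariant: A's fold keeps the three counts of the elif-guarded categories
theorem pv_loop (l : List Char) (a b c : Int) :
    l.foldl (fun d w =>
      if PySem.Chars.isalpha w then d.insert "letter" (d.getD "letter" 0 + 1)
      else if PySem.Chars.isspace w then d.insert "space" (d.getD "space" 0 + 1)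
      else if PySem.Chars.isdigit w then d.insert "digit" (d.getD "digit" 0 + 1)
      else d) (pvInitDict a b c)
    = pvInitDict (a + l.countP PySem.Chars.isalpha)
                 (b + l.countP (fun w => !PySem.Chars.isalpha w && PySem.Chars.isspace w))
                 (c + l.countP (fun w => !PySem.Chars.isalpha w && !PySem.Chars.isspace w
                                          && PySem.Chars.isdigit w)) := by
  induction l generalizing a b c with
  | nil => simp [List.countP]
  | cons w l ih =>
    by_cases ha : PySem.Chars.isalpha w
    · simp only [List.foldl_cons, ha, if_true, pv_init_getD_letter, pv_init_insert_letter, ih,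
        List.countP_cons]
      congr 1 <;> push_cast <;> (try simp [ha]) <;> (try ring)
    · by_cases hs : PySem.Chars.isspace w
      · simp only [List.foldl_cons, ha, hs, if_true, if_false, Bool.false_eq_true,
          pv_init_getD_space, pv_init_insert_space, ih, List.countP_cons]
        congr 1 <;> push_cast <;> (try simp [ha, hs]) <;> (try ring)
      · by_cases hd : PySem.Chars.isdigit w
        · simp only [List.foldl_cons, ha, hs, hd, if_true, if_false, Bool.false_eq_true,
            pv_init_getD_digit, pv_init_insert_digit, ih, List.countP_cons]
          congr 1 <;> push_cast <;> (try simp [ha, hs, hd]) <;> (try ring)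
        · simp only [List.foldl_cons, ha, hs, hd, if_false, Bool.false_eq_true, ih,
            List.countP_cons]
          congr 1 <;> push_cast <;> (try simp [ha, hs, hd]) <;> (try ring)

-- on every char the elif-guarded space/digit tests coincide with the plain tests
theorem pv_space_guard : (fun w => !PySem.Chars.isalpha w && PySem.Chars.isspace w)
    = PySem.Chars.isspace := by
  funext w
  by_cases hs : PySem.Chars.isspace w
  · simp [hs, pv_space_not_alpha w hs]
  · simp [hs]

theorem pv_digit_guard : (fun w => !PySem.Chars.isalpha w && !PySem.Chars.isspace w
    && PySem.Chars.isdigit w) = PySem.Chars.isdigit := by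
  funext w
  by_cases hd : PySem.Chars.isdigit w
  · obtain ⟨h1, h2⟩ := pv_digit_not_alpha_space w hd
    simp [hd, h1, h2]
  · simp [hd]

-- ===== VERDICT (by name: the statement is the Claim_ definition above) =====
theorem count_letter_space_digit_spec : Claim_equal_count_letter_space_digit := by
  intro word _
  unfold Spec_count_letter_space_digit count_letter_space_digit count_letter_space_digit_alt
  rw [pv_loop, pv_space_guard, pv_digit_guard]
  simp [pvInitDict, PySem.Dict.insert, PySem.Dict.empty]
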